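-- pv_equiv track=rewrite | github.com/spmohara/Filter-Trace | src/main.py | search_lines
-- ===== SOURCE A (Python) =====
-- def search_lines(data, keywords, case):
--     """ Searches the file data based on the provided keywords and case.
--
--     Parameters
--     ----------
--     data: list
--         The lines of the file.
--
--     keywords: list
--         The list of keywords to search.
--             ex: ``['keyword']`` or ``['keyword1', 'keyword2']``
--
--     case: bool
--         The case sensitivity of keywords to search.
--
--     Returns
--     -------
--         list
--             The new lines to write.
--     """
--     lines = []
--     for number, line in enumerate(data, start=1):
--         for keyword in keywords:
--             keyword = keyword.lower() if not case else keyword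
--             if keyword in (line.lower() if not case else line):
--                 lines.append(f'{number}: {line}')
--                 break
--     return lines
-- ===== SOURCE B (Python) =====
-- def search_lines(data, keywords, case):
--     hay = data if case else [line.lower() for line in data]
--     pending = list(range(len(data)))
--     hits = set()
--     for keyword in keywords:
--         needle = keyword if case else keyword.lower()
--         still = []
--         for i in pending:
--             if needle in hay[i]:
--                 hits.add(i + 1)
--             else:
--                 still.append(i)
--         pending = still
--     return [f'{i}: {line}' for i, line in enumerate(data, 1) if i in hits]
-- ===== Notes on version B (the rewrite author's own statement) =====
-- stated objective: alternative
-- what changed: B inverts the loop nesting: it iterates keywords in the outer loop over a shrinking worklist of still-unmatched line indices (lines are lowercased once up front), recording matched line numbers in a set, then emits the numbered lines in one final ordered pass; A scans all keywords per line with append-and-break.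
import Mathlib
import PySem

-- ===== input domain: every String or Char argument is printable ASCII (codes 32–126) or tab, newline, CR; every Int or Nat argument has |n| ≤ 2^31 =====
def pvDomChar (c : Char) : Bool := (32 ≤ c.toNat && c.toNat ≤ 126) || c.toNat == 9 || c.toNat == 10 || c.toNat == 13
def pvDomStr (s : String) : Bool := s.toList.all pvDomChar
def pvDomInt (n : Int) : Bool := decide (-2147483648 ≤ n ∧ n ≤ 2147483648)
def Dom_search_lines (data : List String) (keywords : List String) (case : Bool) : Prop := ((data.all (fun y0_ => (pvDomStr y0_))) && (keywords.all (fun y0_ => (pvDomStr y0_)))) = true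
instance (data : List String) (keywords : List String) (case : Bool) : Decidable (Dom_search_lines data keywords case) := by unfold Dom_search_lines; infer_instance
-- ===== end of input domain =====

-- B inverts the loop nesting: keywords outer over a shrinking worklist of still-unmatched line
-- indices (lines lowercased once), then one final ordered pass emits the numbered lines (alternative).

-- ===== PORT A =====
-- inner 'for keyword in keywords: … break' of A: true iff the loop appends (first match breaks)
def searchA_inner (line : String) (case : Bool) (ks : List String) : Bool :=
  match ks with
  | [] => false
  | keyword :: rest =>
    let keyword := if !case then PySem.Str.lower keyword else keyword
    if PySem.Str.isIn keyword (if !case then PySem.Str.lower line else line) then true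
    else searchA_inner line case rest

def search_lines (data : List String) (keywords : List String) (case : Bool) : List String :=
  (PySem.List.enumerate data 1).foldl
    (fun lines p =>
      if searchA_inner p.2 case keywords then
        lines ++ [PySem.Int.toStr p.1 ++ ": " ++ p.2]
      else lines) []

-- ===== PORT B =====
def search_lines_alt (data : List String) (keywords : List String) (case : Bool) : List String :=
  let hay := if case then data else data.map PySem.Str.lower
  let st := keywords.foldl
    (fun (st : PySem.Set Int × List Int) keyword =>
      let needle := if case then keyword else PySem.Str.lower keyword
      st.2.foldl
        (fun (st' : PySem.Set Int × List Int) i =>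
          if PySem.Str.isIn needle (PySem.List.pyGetD hay i "") then
            (PySem.Set.add st'.1 (i + 1), st'.2)
          else (st'.1, st'.2 ++ [i]))
        (st.1, ([] : List Int)))
    ((PySem.Set.empty : PySem.Set Int), PySem.List.pyRange 0 (PySem.List.len data) 1)
  ((PySem.List.enumerate data 1).filter (fun p => PySem.Set.contains st.1 p.1)).map
    (fun p => PySem.Int.toStr p.1 ++ ": " ++ p.2)

-- ===== PRECONDITION & SPEC =====
def Spec_search_lines (data : List String) (keywords : List String) (case : Bool) (out : List String) : Prop := out = search_lines_alt data keywords case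
instance (data : List String) (keywords : List String) (case : Bool) (out : List String) : Decidable (Spec_search_lines data keywords case out) := by unfold Spec_search_lines; infer_instance

-- ===== CLAIM (what is proved, stated in full; the proofs are below) =====
def Claim_equal_search_lines : Prop := ∀ (data : List String) (keywords : List String) (case : Bool), Dom_search_lines data keywords case → Spec_search_lines data keywords case (search_lines data keywords case)

-- ===== LEMMAS AND PROOFS =====

-- the fst / snd components of B's inner worklist fold evolve independently
theorem inner_fold_fst (f : Int → Bool) (p : List Int) (st0 : PySem.Set Int × List Int) :
    (p.foldl
        (fun (st' : PySem.Set Int × List Int) i =>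
          if f i then (PySem.Set.add st'.1 (i + 1), st'.2) else (st'.1, st'.2 ++ [i])) st0).1
      = p.foldl (fun h i => if f i then PySem.Set.add h (i + 1) else h) st0.1 := by
  induction p generalizing st0 with
  | nil => rfl
  | cons x xs ih =>
    simp only [List.foldl_cons]
    by_cases hx : f x = true <;> simp [hx, ih]

theorem inner_fold_snd (f : Int → Bool) (p : List Int) (st0 : PySem.Set Int × List Int) :
    (p.foldl
        (fun (st' : PySem.Set Int × List Int) i =>
          if f i then (PySem.Set.add st'.1 (i + 1), st'.2) else (st'.1, st'.2 ++ [i])) st0).2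
      = st0.2 ++ p.filter (fun i => !f i) := by
  induction p generalizing st0 with
  | nil => simp
  | cons x xs ih =>
    simp only [List.foldl_cons, List.filter_cons]
    by_cases hx : f x = true <;> simp [hx, ih]

-- membership in the hit set built by one keyword's pass over the worklist
theorem mem_hits_one (f : Int → Bool) (j : Int) (p : List Int) (h0 : PySem.Set Int) :
    j ∈ p.foldl (fun h i => if f i then PySem.Set.add h (i + 1) else h) h0
      ↔ j ∈ h0 ∨ ∃ i ∈ p, j = i + 1 ∧ f i = true := by
  induction p generalizing h0 with
  | nil => simp
  | cons x xs ih =>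
    simp only [List.foldl_cons]
    by_cases hx : f x = true
    · rw [if_pos hx, ih]
      constructor
      · rintro (h | ⟨i, hi, h1, h2⟩)
        · rcases (PySem.Set.mem_add _ _ _).1 h with h' | h'
          · exact Or.inl h'
          · exact Or.inr ⟨x, List.mem_cons_self, h', hx⟩
        · exact Or.inr ⟨i, List.mem_cons_of_mem _ hi, h1, h2⟩
      · rintro (h | ⟨i, hi, h1, h2⟩)
        · exact Or.inl ((PySem.Set.mem_add _ _ _).2 (Or.inl h))
        · rcases List.mem_cons.1 hi with rfl | hi'
          · exact Or.inl ((PySem.Set.mem_add _ _ _).2 (Or.inr h1))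
          · exact Or.inr ⟨i, hi', h1, h2⟩
    · rw [if_neg hx, ih]
      constructor
      · rintro (h | ⟨i, hi, h1, h2⟩)
        · exact Or.inl h
        · exact Or.inr ⟨i, List.mem_cons_of_mem _ hi, h1, h2⟩
      · rintro (h | ⟨i, hi, h1, h2⟩)
        · exact Or.inl h
        · rcases List.mem_cons.1 hi with rfl | hi'
          · exact absurd h2 hx
          · exact Or.inr ⟨i, hi', h1, h2⟩

-- B's outer fold over keywords: membership in the final hit set, for any start state
theorem mem_outer_fold (g : String → Int → Bool) (j : Int) (ks : List String)
    (h0 : PySem.Set Int) (p0 : List Int) :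
    j ∈ (ks.foldl
        (fun (st : PySem.Set Int × List Int) keyword =>
          st.2.foldl
            (fun (st' : PySem.Set Int × List Int) i =>
              if g keyword i then (PySem.Set.add st'.1 (i + 1), st'.2)
              else (st'.1, st'.2 ++ [i]))
            (st.1, ([] : List Int))) (h0, p0)).1
      ↔ j ∈ h0 ∨ ∃ i ∈ p0, j = i + 1 ∧ ∃ k ∈ ks, g k i = true := by
  induction ks generalizing h0 p0 with
  | nil => simp
  | cons k ks ih =>
    simp only [List.foldl_cons]
    have hfst := inner_fold_fst (g k) p0 (h0, ([] : List Int))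
    have hsnd := inner_fold_snd (g k) p0 (h0, ([] : List Int))
    rcases hst : p0.foldl
        (fun (st' : PySem.Set Int × List Int) i =>
          if g k i then (PySem.Set.add st'.1 (i + 1), st'.2) else (st'.1, st'.2 ++ [i]))
        (h0, ([] : List Int)) with ⟨h1, p1⟩
    rw [hst] at hfst hsnd
    simp only at hfst hsnd
    rw [ih, hfst, mem_hits_one, hsnd]
    simp only [List.nil_append]
    constructor
    · rintro ((h | ⟨i, hi, h1, h2⟩) | ⟨i, hi, h1, k', hk', h2⟩)
      · exact Or.inl h
      · exact Or.inr ⟨i, hi, h1, k, List.mem_cons_self, h2⟩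
      · exact Or.inr ⟨i, (List.mem_filter.1 hi).1, h1, k', List.mem_cons_of_mem _ hk', h2⟩
    · rintro (h | ⟨i, hi, h1, k', hk', h2⟩)
      · exact Or.inl (Or.inl h)
      · rcases List.mem_cons.1 hk' with rfl | hk''
        · exact Or.inl (Or.inr ⟨i, hi, h1, h2⟩)
        · by_cases hki : g k i = true
          · exact Or.inl (Or.inr ⟨i, hi, h1, hki⟩)
          · exact Or.inr ⟨i, List.mem_filter.2 ⟨hi, by simp [hki]⟩, h1, k', hk'', h2⟩

-- A's first-match-with-break inner loop decides 'any keyword matches'.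
theorem searchA_inner_eq_any (line : String) (case : Bool) (ks : List String) :
    searchA_inner line case ks
      = ks.any (fun k => PySem.Str.isIn (if case then k else PySem.Str.lower k)
          (if case then line else PySem.Str.lower line)) := by
  induction ks with
  | nil => cases case <;> simp [searchA_inner]
  | cons k rest ih =>
    cases case <;> simp [searchA_inner, List.any_cons, ih]

-- ===== VERDICT (by name: the statement is the Claim_ definition above) =====
theorem search_lines_spec : Claim_equal_search_lines := by
  intro data keywords case _
  unfold Spec_search_lines search_lines search_lines_alt
  simp only []
  rw [PySem.List.foldl_append_if
        (fun p : Int × String => searchA_inner p.2 case keywords)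
        (fun p : Int × String => PySem.Int.toStr p.1 ++ ": " ++ p.2)]
  simp only [List.nil_append]
  congr 1
  apply List.filter_congr
  intro p hp
  rcases (PySem.List.mem_enumerate_iff _ _ _).1 hp with ⟨m, hm, rfl⟩
  have hlen : (if case then data else data.map PySem.Str.lower).length = data.length := by
    cases case <;> simp
  rw [searchA_inner_eq_any, Bool.eq_iff_iff, List.any_eq_true, PySem.Set.contains_iff,
    mem_outer_fold
      (fun keyword i => PySem.Str.isIn (if case then keyword else PySem.Str.lower keyword)
        (PySem.List.pyGetD (if case then data else data.map PySem.Str.lower) i ""))]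
  constructor
  · rintro ⟨k, hk, hmatch⟩
    refine Or.inr ⟨(m : Int), ?_, by ring, k, hk, ?_⟩
    · rw [PySem.List.mem_pyRange_one]
      constructor
      · exact Int.natCast_nonneg m
      · simp [PySem.List.len]; exact_mod_cast hm
    · rw [PySem.List.pyGetD_natCast, List.getD_eq_getElem _ _ (by omega)]
      cases case <;> simp_all
  · rintro (h | ⟨i, hi, h1, k, hk, hmatch⟩)
    · simp [PySem.Set.empty] at h
    · rw [PySem.List.mem_pyRange_one] at hi
      simp only [PySem.List.len] at hi
      obtain ⟨i', rfl⟩ : ∃ i' : Nat, i = (i' : Int) := ⟨i.toNat, by omega⟩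
      have hi' : i' = m := by omega
      subst hi'
      rw [PySem.List.pyGetD_natCast, List.getD_eq_getElem _ _ (by omega)] at hmatch
      refine ⟨k, hk, ?_⟩
      cases case <;> simp_all
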